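-- pv_equiv track=rewrite | github.com/kcpalmisano/Library | Models/Text_Extraction/Simple_TextExtract.py | combine_texts
-- ===== SOURCE A (Python) =====
-- from collections import Counter
--
-- def combine_texts(texts):
--     """
--     Combines multiple text outputs using a voting mechanism to select the most frequent words.
--
--     :param texts: List of text strings.
--     :return: Combined text string.
--     """
--     lines = [text.split('\n') for text in texts]
--     combined_lines = []
--
--     for lines_group in zip(*lines):
--         words = [line.split() for line in lines_group]
--         combined_words = []
--
--         for words_group in zip(*words):
--             most_common_word, _ = Counter(words_group).most_common(1)[0]
--             combined_words.append(most_common_word)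
--
--         combined_lines.append(' '.join(combined_words))
--
--     return '\n'.join(combined_lines)
-- ===== SOURCE B (Python) =====
-- def combine_texts(texts):
--     """
--     Combines multiple text outputs using a voting mechanism to select the most frequent words.
--
--     :param texts: List of text strings.
--     :return: Combined text string.
--     """
--     grids = [[line.split() for line in text.split('\n')] for text in texts]
--     if not grids:
--         return ''
--     n_lines = min(len(g) for g in grids)
--     widths = [min(len(g[li]) for g in grids) for li in range(n_lines)]
--     votes = [[{} for _ in range(w)] for w in widths]
--     for g in grids:
--         for li in range(n_lines):
--             row = g[li]
--             for wi in range(widths[li]):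
--                 tally = votes[li][wi]
--                 word = row[wi]
--                 tally[word] = tally.get(word, 0) + 1
--     return '\n'.join(
--         ' '.join(max(tally.items(), key=lambda kv: kv[1])[0] for tally in row)
--         for row in votes)
-- ===== Notes on version B (the rewrite author's own statement) =====
-- stated objective: alternative
-- what changed: Replaces A's double zip-transposition with per-position Counter().most_common(1) by a single sweep over the texts that casts each text's words as votes into per-(line,position) tally dicts, reading each winner off once at the end (dict insertion order reproduces Counter's earliest-first tie-break).
import Mathlib
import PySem

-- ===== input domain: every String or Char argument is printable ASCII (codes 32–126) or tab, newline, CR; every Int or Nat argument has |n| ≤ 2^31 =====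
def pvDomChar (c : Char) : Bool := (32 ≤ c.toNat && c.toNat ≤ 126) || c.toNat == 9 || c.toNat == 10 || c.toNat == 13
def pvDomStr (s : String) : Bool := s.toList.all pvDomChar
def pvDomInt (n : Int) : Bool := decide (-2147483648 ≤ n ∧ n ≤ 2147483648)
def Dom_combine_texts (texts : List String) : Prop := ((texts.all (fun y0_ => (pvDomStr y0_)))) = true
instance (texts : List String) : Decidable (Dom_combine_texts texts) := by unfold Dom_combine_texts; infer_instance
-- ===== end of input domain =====

-- B replaces A's zip-transposition + per-group Counter by a single sweep over the texts that
-- casts each text's votes into per-(line, position) tally dicts, then reads each winner off once.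

-- Python's variadic zip(*ls): truncate to the shortest list; builtin used by PORT A only.
def pyZipStar {α : Type} [Inhabited α] (ls : List (List α)) : List (List α) :=
  match ls with
  | [] => []
  | l0 :: rest =>
    let n := rest.foldl (fun m l => min m l.length) l0.length
    (List.range n).map (fun i => (l0 :: rest).map (fun l => l[i]!))

-- ===== PORT A =====
-- Counter(words_group).most_common(1)[0]: counter, then stable sort by count descending
-- (= heapq.nlargest, stable), then the first item.  The '.headD ("", 0)' default is never
-- reached: every words_group produced by zip is nonempty.
def combine_texts (texts : List String) : String :=
  let lines := texts.map (fun t => (PySem.Str.split? t "\n").getD [])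
  let combined_lines := (pyZipStar lines).foldl (fun acc lines_group =>
    let words := lines_group.map PySem.Str.split₀
    let combined_words := (pyZipStar words).foldl (fun acc2 words_group =>
      let most_common_word :=
        ((PySem.List.sorted (PySem.Dict.counter words_group).items (fun p => p.2) true).headD ("", (0 : Int))).1
      acc2 ++ [most_common_word]) []
    acc ++ [PySem.Str.join " " combined_words]) []
  PySem.Str.join "\n" combined_lines

-- ===== PORT B =====
-- One sweep over the texts filling vote tables; in-place mutation of the nested lists/dicts is
-- ported as List.modify / Dict.insert.  max(tally.items(), key=kv[1])[0]: PySem.List.max? is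
-- Python's max (first extremal element); the '.getD ("", 0)' default is never reached (every
-- tally collected at least one vote).
def combine_texts_alt (texts : List String) : String :=
  match texts.map (fun t => ((PySem.Str.split? t "\n").getD []).map PySem.Str.split₀) with
  | [] => ""
  | g0 :: grest =>
    let grids := g0 :: grest
    let n_lines := grest.foldl (fun m g => min m g.length) g0.length
    let widths := (List.range n_lines).map (fun li =>
      grest.foldl (fun m g => min m (g[li]!).length) (g0[li]!).length)
    let votes0 := widths.map (fun w => (List.range w).map (fun _ => (PySem.Dict.empty : PySem.Dict String Int)))
    let votes := grids.foldl (fun vs g =>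
      (List.range n_lines).foldl (fun vs li =>
        vs.modify li (fun vrow =>
          (List.range (widths[li]!)).foldl (fun vr wi =>
            vr.modify wi (fun tally =>
              let word := (g[li]!)[wi]!
              tally.insert word (tally.getD word 0 + 1))) vrow)) vs) votes0
    PySem.Str.join "\n" (votes.map (fun vrow =>
      PySem.Str.join " " (vrow.map (fun tally =>
        ((PySem.List.max? tally.items (fun kv => kv.2)).getD ("", (0 : Int))).1))))

-- ===== PRECONDITION & SPEC =====
def Spec_combine_texts (texts : List String) (out : String) : Prop := out = combine_texts_alt texts
instance (texts : List String) (out : String) : Decidable (Spec_combine_texts texts out) := by unfold Spec_combine_texts; infer_instance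

-- ===== CLAIM (what is proved, stated in full; the proofs are below) =====
def Claim_equal_combine_texts : Prop := ∀ (texts : List String), Dom_combine_texts texts → Spec_combine_texts texts (combine_texts texts)

-- ===== LEMMAS AND PROOFS =====

-- the one-step state of Python's max(xs, key): keep the earlier element on ties
def maxStep {α κ : Type} [LinearOrder κ] (key : α → κ) (acc : Option α) (x : α) : Option α :=
  match acc with
  | none => some x
  | some m => if key m < key x then some x else some m

@[simp] theorem maxStep_none {α κ : Type} [LinearOrder κ] (key : α → κ) (x : α) :
    maxStep key none x = some x := rfl

@[simp] theorem maxStep_some {α κ : Type} [LinearOrder κ] (key : α → κ) (m x : α) :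
    maxStep key (some m) x = if key m < key x then some x else some m := rfl

theorem max?_eq_foldl_maxStep {α κ : Type} [LinearOrder κ] (l : List α) (key : α → κ) :
    PySem.List.max? l key = List.foldl (maxStep key) none l := rfl

-- the head-only view of one insertion step
def insStep {α : Type} (bef : α → α → Bool) (o : Option α) (x : α) : Option α :=
  match o with
  | none => some x
  | some y => if bef x y then some x else some y

theorem head?_insertBy {α : Type} (bef : α → α → Bool) (x : α) (acc : List α) :
    (PySem.List.insertBy bef x acc).head? = insStep bef acc.head? x := by
  cases acc with
  | nil => simp [PySem.List.insertBy, insStep]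
  | cons y ys =>
    simp only [PySem.List.insertBy, List.head?, insStep]
    by_cases h : bef x y <;> simp [h]

-- head of the stable insertion sort = the running first-max fold
theorem head?_foldl_insertBy {α : Type} (bef : α → α → Bool) (l : List α) (acc : List α) :
    (List.foldl (fun a x => PySem.List.insertBy bef x a) acc l).head? =
      List.foldl (insStep bef) acc.head? l := by
  induction l generalizing acc with
  | nil => rfl
  | cons x t ih =>
    simp only [List.foldl]
    rw [ih, head?_insertBy]

theorem insStep_eq_maxStep {α κ : Type} [LinearOrder κ] (key : α → κ) :
    insStep (fun a b => decide (key b < key a)) = maxStep key := by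
  funext o x
  cases o with
  | none => rfl
  | some m => simp [insStep, maxStep]

-- sorted(xs, key, reverse=True)[0] is Python's max(xs, key) (first maximal element)
theorem sorted_rev_head?_eq_max? {α κ : Type} [LinearOrder κ] (l : List α) (key : α → κ) :
    (PySem.List.sorted l key true).head? = PySem.List.max? l key := by
  unfold PySem.List.sorted
  simp only [if_pos]
  rw [head?_foldl_insertBy, insStep_eq_maxStep, max?_eq_foldl_maxStep]
  rfl

-- max? over a mapped list
theorem max?_map {α β κ : Type} [LinearOrder κ] (f : α → β) (l : List α) (key : β → κ) :
    PySem.List.max? (l.map f) key = Option.map f (PySem.List.max? l (fun x => key (f x))) := by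
  rw [max?_eq_foldl_maxStep, max?_eq_foldl_maxStep]
  suffices h : ∀ (o : Option α),
      List.foldl (maxStep key) (Option.map f o) (l.map f)
        = Option.map f (List.foldl (maxStep (fun x => key (f x))) o l) by
    simpa using h none
  induction l with
  | nil => intro o; rfl
  | cons x t ih =>
    intro o
    simp only [List.map, List.foldl]
    rw [← ih]
    congr 1
    cases o with
    | none => rfl
    | some m => simp [maxStep, apply_ite (Option.map f)]

-- the Int-cast of a Nat-valued key changes nothing
theorem max?_key_natCast {α : Type} (l : List α) (cnt : α → Nat) :
    PySem.List.max? l (fun w => (cnt w : Int)) = PySem.List.max? l cnt := by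
  rw [max?_eq_foldl_maxStep, max?_eq_foldl_maxStep]
  congr 1
  funext o x
  cases o with
  | none => rfl
  | some m => simp [maxStep, Nat.cast_lt]

-- dropping elements that never beat the seed leaves the first-max fold unchanged
theorem foldl_max_filter {α κ : Type} [LinearOrder κ] (key : α → κ) (p : α → Bool)
    (l : List α) (m : α) (h : ∀ y ∈ l, p y = false → key y ≤ key m) :
    List.foldl (maxStep key) (some m) (l.filter p)
      = List.foldl (maxStep key) (some m) l := by
  induction l generalizing m with
  | nil => rfl
  | cons y t ih =>
    by_cases hp : p y = true
    · simp only [List.filter, hp, List.foldl, maxStep_some]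
      split
      · rename_i hlt
        exact ih y (fun z hz hpz => le_trans (h z (List.mem_cons_of_mem _ hz) hpz) (le_of_lt hlt))
      · exact ih m (fun z hz hpz => h z (List.mem_cons_of_mem _ hz) hpz)
    · have hpf : p y = false := by simpa using hp
      have hy : key y ≤ key m := h y List.mem_cons_self hpf
      simp only [List.filter, hpf, List.foldl, maxStep_some, if_neg (not_lt.mpr hy)]
      exact ih m (fun z hz hpz => h z (List.mem_cons_of_mem _ hz) hpz)

-- ofList's elements not already seen are appended in order (generalized seed)
theorem foldl_add_append {α : Type} [DecidableEq α] (t : List α) (s : PySem.Set α) :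
    List.foldl PySem.Set.add s t
      = s ++ (List.foldl PySem.Set.add (PySem.Set.empty : PySem.Set α) t).filter
          (fun z => decide (z ∉ s)) := by
  induction t generalizing s with
  | nil => simp [PySem.Set.empty]
  | cons y u ih =>
    have hy : List.foldl PySem.Set.add (PySem.Set.empty : PySem.Set α) (y :: u)
        = [y] ++ (List.foldl PySem.Set.add (PySem.Set.empty : PySem.Set α) u).filter
            (fun z => decide (z ∉ [y])) := by
      have h1 : PySem.Set.add (PySem.Set.empty : PySem.Set α) y = [y] := rfl
      simpa [List.foldl, h1] using ih ([y] : PySem.Set α)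
    by_cases hmem : y ∈ s
    · have hadd : PySem.Set.add s y = s := by
        unfold PySem.Set.add PySem.Set.contains
        rw [if_pos (by simp [hmem])]
      calc List.foldl PySem.Set.add s (y :: u)
          = List.foldl PySem.Set.add s u := by simp only [List.foldl, hadd]
        _ = s ++ (List.foldl PySem.Set.add (PySem.Set.empty : PySem.Set α) u).filter
              (fun z => decide (z ∉ s)) := ih s
        _ = s ++ (List.foldl PySem.Set.add (PySem.Set.empty : PySem.Set α) (y :: u)).filter
              (fun z => decide (z ∉ s)) := by
            rw [hy]
            simp only [List.filter_append, List.filter_filter]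
            have h1 : ([y].filter (fun z => decide (z ∉ s))) = [] := by simp [hmem]
            rw [h1]
            simp only [List.nil_append]
            congr 1
            apply List.filter_congr
            intro z _
            by_cases hzs : z ∈ s
            · simp [hzs]
            · have : z ≠ y := fun h => hzs (h ▸ hmem)
              simp [hzs, this]
    · have hadd : PySem.Set.add s y = s ++ [y] := by
        unfold PySem.Set.add PySem.Set.contains
        rw [if_neg (by simp [hmem])]
      calc List.foldl PySem.Set.add s (y :: u)
          = List.foldl PySem.Set.add (s ++ [y]) u := by simp only [List.foldl, hadd]
        _ = (s ++ [y]) ++ (List.foldl PySem.Set.add (PySem.Set.empty : PySem.Set α) u).filter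
              (fun z => decide (z ∉ s ++ [y])) := ih (s ++ [y])
        _ = s ++ (List.foldl PySem.Set.add (PySem.Set.empty : PySem.Set α) (y :: u)).filter
              (fun z => decide (z ∉ s)) := by
            rw [hy]
            simp only [List.filter_append, List.filter_filter, List.append_assoc]
            congr 1
            have h1 : ([y].filter (fun z => decide (z ∉ s))) = [y] := by simp [hmem]
            rw [h1]
            congr 1
            apply List.filter_congr
            intro z _
            by_cases hzy : z = y <;> simp [hzy]

-- PySem.Set.ofList (first-occurrence dedup) decomposed one step
theorem ofList_cons_eq_filter {α : Type} [DecidableEq α] (x : α) (t : List α) :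
    (PySem.Set.ofList (x :: t) : List α)
      = x :: (PySem.Set.ofList t : List α).filter (fun z => decide (z ≠ x)) := by
  have h0 : (PySem.Set.ofList (x :: t) : List α)
      = List.foldl PySem.Set.add ([x] : PySem.Set α) t := rfl
  rw [h0, foldl_add_append t ([x] : PySem.Set α)]
  simp only [List.singleton_append, PySem.Set.ofList]
  congr 1
  apply List.filter_congr
  intro z _
  simp

-- the first-max fold ignores later duplicates (seeded form)
theorem foldl_max_ofList {α κ : Type} [DecidableEq α] [LinearOrder κ] (key : α → κ)
    (t : List α) (m : α) :
    List.foldl (maxStep key) (some m) (PySem.Set.ofList t : List α)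
      = List.foldl (maxStep key) (some m) t := by
  induction t generalizing m with
  | nil => rfl
  | cons y u ih =>
    rw [ofList_cons_eq_filter]
    simp only [List.foldl, maxStep_some]
    by_cases h : key m < key y
    · simp only [if_pos h]
      rw [foldl_max_filter key _ _ y (by
        intro z hz hpz
        have hzy : z = y := by simpa using hpz
        rw [hzy])]
      exact ih y
    · simp only [if_neg h]
      rw [foldl_max_filter key _ _ m (by
        intro z hz hpz
        have hzy : z = y := by simpa using hpz
        rw [hzy]
        exact not_lt.mp h)]
      exact ih m

-- max? ignores later duplicates: max? over the first-occurrence dedup = max? over the list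
theorem max?_dedup {α : Type} [DecidableEq α] {κ : Type} [LinearOrder κ]
    (l : List α) (key : α → κ) :
    PySem.List.max? (PySem.Set.ofList l : List α) key = PySem.List.max? l key := by
  cases l with
  | nil => rfl
  | cons x t =>
    rw [max?_eq_foldl_maxStep, max?_eq_foldl_maxStep, ofList_cons_eq_filter]
    simp only [List.foldl, maxStep_none]
    rw [foldl_max_filter key _ _ x (by
      intro z hz hpz
      have : z = x := by simpa using hpz
      rw [this])]
    exact foldl_max_ofList key t x

-- B's selection: max(Counter(wg).items(), key=count)[0] = max(wg, key=wg.count)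
theorem counter_select (wg : List String) :
    ((PySem.List.max? (PySem.Dict.counter wg).items (fun kv => kv.2)).getD ("", (0 : Int))).1
      = (PySem.List.max? wg (fun w => PySem.List.count wg w)).getD "" := by
  rw [PySem.Dict.items_counter,
    max?_map (fun k => (k, (List.count k wg : Int))) _ (fun p => p.2)]
  have hcast : PySem.List.max? (PySem.Set.ofList wg : List String)
        (fun x => ((fun k => (k, (List.count k wg : Int))) x).2)
      = PySem.List.max? (PySem.Set.ofList wg : List String) (fun k => List.count k wg) :=
    max?_key_natCast _ (fun k => List.count k wg)
  rw [hcast, max?_dedup]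
  have hkey : (fun w => PySem.List.count wg w) = (fun k : String => List.count k wg) := by
    funext k; exact PySem.List.count_eq wg k
  rw [hkey]
  cases h : PySem.List.max? wg (fun k : String => List.count k wg) <;> simp

-- A's selection: Counter(wg).most_common(1)[0][0] = max(wg, key=wg.count)
theorem inner_select (wg : List String) :
    ((PySem.List.sorted (PySem.Dict.counter wg).items (fun p => p.2) true).headD ("", (0 : Int))).1
      = (PySem.List.max? wg (fun w => PySem.List.count wg w)).getD "" := by
  rw [List.headD_eq_head?_getD, sorted_rev_head?_eq_max?]
  exact counter_select wg


-- ===== B-side machinery: the vote-table sweep in closed form =====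

theorem foldl_min_le_init {α : Type} (f : α → Nat) (l : List α) (a : Nat) :
    l.foldl (fun m x => min m (f x)) a ≤ a := by
  induction l generalizing a with
  | nil => simp
  | cons x t ih => exact le_trans (ih _) (min_le_left _ _)

theorem foldl_min_le_mem {α : Type} (f : α → Nat) (l : List α) (a : Nat)
    (x : α) (hx : x ∈ l) : l.foldl (fun m x => min m (f x)) a ≤ f x := by
  induction l generalizing a with
  | nil => cases hx
  | cons y t ih =>
    rcases List.mem_cons.mp hx with h | h
    · subst h; exact le_trans (foldl_min_le_init f t _) (min_le_right _ _)
    · exact ih _ h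

def ctN (l0 : List String) (lrest : List (List String)) : Nat :=
  lrest.foldl (fun m l => min m l.length) l0.length

def ctW (l0 : List String) (lrest : List (List String)) (li : Nat) : Nat :=
  lrest.foldl (fun m l => min m (PySem.Str.split₀ (l[li]!)).length) (PySem.Str.split₀ (l0[li]!)).length

def ctCol (l0 : List String) (lrest : List (List String)) (li wi : Nat) : List String :=
  (l0 :: lrest).map (fun l => (PySem.Str.split₀ (l[li]!))[wi]!)

-- A-side normal form
theorem A_core (l0 : List String) (lrest : List (List String)) (f : List String → String) :
    (pyZipStar (l0 :: lrest)).map (fun lg =>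
        PySem.Str.join " " ((pyZipStar (lg.map PySem.Str.split₀)).map f))
      = (List.range (ctN l0 lrest)).map (fun li =>
          PySem.Str.join " " ((List.range (ctW l0 lrest li)).map (fun wi => f (ctCol l0 lrest li wi)))) := by
  show ((List.range (ctN l0 lrest)).map _).map _ = _
  rw [List.map_map]
  apply List.map_congr_left
  intro li _
  simp only [Function.comp_def]
  congr 1
  show (pyZipStar (((l0 :: lrest).map (fun l => l[li]!)).map PySem.Str.split₀)).map f = _
  rw [List.map_map]
  simp only [List.map_cons, Function.comp_def]
  show ((List.range _).map _).map f = _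
  rw [List.map_map]
  simp only [Function.comp_def]
  have hw : (lrest.map (fun l => PySem.Str.split₀ (l[li]!))).foldl (fun m w => min m w.length)
      (PySem.Str.split₀ (l0[li]!)).length = ctW l0 lrest li := by
    rw [List.foldl_map]; rfl
  rw [hw]
  apply List.map_congr_left
  intro wi _
  congr 1
  show ((PySem.Str.split₀ (l0[li]!) :: lrest.map (fun l => PySem.Str.split₀ (l[li]!))).map (fun w => w[wi]!)) = _
  simp only [List.map_cons, List.map_map, ctCol, Function.comp_def]

theorem foldl_modify_succ {α : Type} (g : Nat → α → α) (is : List Nat) (y : α) (xs : List α) :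
    is.foldl (fun l i => l.modify (i+1) (g i)) (y::xs) = y :: is.foldl (fun l i => l.modify i (g i)) xs := by
  induction is generalizing xs with
  | nil => rfl
  | cons i t ih =>
    simp only [List.foldl, List.modify_cons]
    rw [if_neg (Nat.succ_ne_zero i)]
    simp only [Nat.add_sub_cancel]
    exact ih _

theorem foldl_modify_range {α : Type} (f : Nat → α → α) (vs : List α) :
    (List.range vs.length).foldl (fun l i => l.modify i (f i)) vs = vs.mapIdx f := by
  induction vs generalizing f with
  | nil => rfl
  | cons x xs ih =>
    simp only [List.length_cons, List.range_succ_eq_map, List.foldl_cons, List.foldl_map,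
      List.modify_cons, List.mapIdx_cons, if_true, Nat.succ_eq_add_one]
    rw [foldl_modify_succ (fun i => f (i+1))]
    rw [ih (fun i => f (i+1))]

-- the whole vote-casting double loop = mapIdx of per-cell folds
theorem votes_eq {α β : Type} (n : Nat) (wl : List Nat) (hwl : wl.length = n)
    (u : β → Nat → Nat → α → α) (gs : List β) :
    ∀ (vs : List (List α)), (hv : vs.length = n) →
    (∀ li (h : li < n), (vs[li]'(by omega)).length = wl[li]'(by omega)) →
    gs.foldl (fun vs g =>
      (List.range n).foldl (fun vs li =>
        vs.modify li (fun vrow =>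
          (List.range (wl[li]!)).foldl (fun vr wi =>
            vr.modify wi (u g li wi)) vrow)) vs) vs
    = vs.mapIdx (fun li vrow => vrow.mapIdx (fun wi t => gs.foldl (fun t g => u g li wi t) t)) := by
  induction gs with
  | nil =>
    intro vs hv hrow
    apply List.ext_getElem (by simp)
    intro i h1 h2
    simp [List.getElem_mapIdx]
    apply List.ext_getElem (by simp)
    intro j h3 h4
    simp [List.getElem_mapIdx]
  | cons g gt ih =>
    intro vs hv hrow
    have hcast : (List.range n).foldl (fun vs li =>
        vs.modify li (fun vrow =>
          (List.range (wl[li]!)).foldl (fun vr wi =>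
            vr.modify wi (u g li wi)) vrow)) vs
        = vs.mapIdx (fun li vrow => vrow.mapIdx (fun wi t => u g li wi t)) := by
      rw [← hv, foldl_modify_range]
      apply List.ext_getElem (by simp)
      intro i h1 h2
      simp only [List.getElem_mapIdx]
      have hi : i < n := by simpa [hv] using (by simpa using h1 : i < vs.length)
      have hwli : wl[i]! = wl[i]'(by omega) := getElem!_pos wl i (by omega)
      have hlen : wl[i]! = (vs[i]'(by simpa [hv] using hi)).length := by
        rw [hwli, hrow i hi]
      rw [hlen, foldl_modify_range]
    simp only [List.foldl_cons]
    rw [hcast]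
    rw [ih _ (by simpa using hv) (by
      intro li h
      simp only [List.getElem_mapIdx, List.length_mapIdx]
      exact hrow li h)]
    apply List.ext_getElem (by simp)
    intro i h1 h2
    simp only [List.getElem_mapIdx]
    apply List.ext_getElem (by simp)
    intro j h3 h4
    simp only [List.getElem_mapIdx]

theorem B_core (l0 : List String) (lrest : List (List String)) :
    (let g0 := l0.map PySem.Str.split₀
     let grest := lrest.map (fun l => l.map PySem.Str.split₀)
     let n_lines := grest.foldl (fun m g => min m g.length) g0.length
     let widths := (List.range n_lines).map (fun li =>
       grest.foldl (fun m g => min m (g[li]!).length) (g0[li]!).length)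
     let votes0 := widths.map (fun w => (List.range w).map (fun _ => (PySem.Dict.empty : PySem.Dict String Int)))
     let votes := (g0 :: grest).foldl (fun vs g =>
       (List.range n_lines).foldl (fun vs li =>
         vs.modify li (fun vrow =>
           (List.range (widths[li]!)).foldl (fun vr wi =>
             vr.modify wi (fun tally =>
               let word := (g[li]!)[wi]!
               tally.insert word (tally.getD word 0 + 1))) vrow)) vs) votes0
     votes.map (fun vrow =>
       PySem.Str.join " " (vrow.map (fun tally =>
         ((PySem.List.max? tally.items (fun kv => kv.2)).getD ("", (0 : Int))).1))))
    = (List.range (ctN l0 lrest)).map (fun li =>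
        PySem.Str.join " " ((List.range (ctW l0 lrest li)).map (fun wi =>
          (PySem.List.max? (ctCol l0 lrest li wi) (fun w => PySem.List.count (ctCol l0 lrest li wi) w)).getD ""))) := by
  simp only []
  have hn : (lrest.map (fun l => l.map PySem.Str.split₀)).foldl (fun m g => min m g.length)
      (l0.map PySem.Str.split₀).length = ctN l0 lrest := by
    rw [List.foldl_map]
    simp only [List.length_map]
    rfl
  rw [hn]
  have hb : ∀ l ∈ (l0 :: lrest), ctN l0 lrest ≤ l.length := by
    intro l hl
    rcases List.mem_cons.mp hl with h | h
    · rw [h]; exact foldl_min_le_init List.length lrest _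
    · exact foldl_min_le_mem List.length lrest (l0.length) l h
  -- widths entries
  have hwidth : ∀ (li : Nat), li < ctN l0 lrest →
      ((List.range (ctN l0 lrest)).map (fun li =>
        (lrest.map (fun l => l.map PySem.Str.split₀)).foldl (fun m g => min m (g[li]!).length)
          ((l0.map PySem.Str.split₀)[li]!).length))[li]! = ctW l0 lrest li := by
    intro li hli
    rw [getElem!_pos _ li (by simpa using hli), List.getElem_map, List.getElem_range]
    rw [List.foldl_map]
    have h0 : ((l0.map PySem.Str.split₀)[li]!) = PySem.Str.split₀ (l0[li]!) := by
      have hl0 : li < l0.length := lt_of_lt_of_le hli (hb l0 (List.mem_cons_self))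
      rw [getElem!_pos _ li (by simpa using hl0), List.getElem_map, getElem!_pos _ li hl0]
    rw [h0]
    apply PySem.List.foldl_congr_mem
    intro acc l hl
    have hll : li < l.length := lt_of_lt_of_le hli (hb l (List.mem_cons_of_mem _ hl))
    rw [getElem!_pos _ li (by simpa using hll), List.getElem_map, getElem!_pos _ li hll]
  set wexpr := (List.range (ctN l0 lrest)).map (fun li =>
      (lrest.map (fun l => l.map PySem.Str.split₀)).foldl (fun m g => min m (g[li]!).length)
        ((l0.map PySem.Str.split₀)[li]!).length) with hwexpr
  have hwl : wexpr.length = ctN l0 lrest := by simp [hwexpr]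
  have hv0len : (wexpr.map (fun w => (List.range w).map (fun _ => (PySem.Dict.empty : PySem.Dict String Int)))).length = ctN l0 lrest := by
    simp [hwexpr]
  have hrow0 : ∀ li (h : li < ctN l0 lrest),
      ((wexpr.map (fun w => (List.range w).map (fun _ => (PySem.Dict.empty : PySem.Dict String Int))))[li]'(by omega)).length
        = wexpr[li]'(by omega) := by
    intro li h
    simp [List.getElem_map]
  have hv := votes_eq (ctN l0 lrest) wexpr hwl
    (fun g li wi tally =>
      let word := (g[li]!)[wi]!
      tally.insert word (tally.getD word 0 + 1))
    ((l0.map PySem.Str.split₀) :: lrest.map (fun l => l.map PySem.Str.split₀))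
    (wexpr.map (fun w => (List.range w).map (fun _ => (PySem.Dict.empty : PySem.Dict String Int))))
    hv0len hrow0
  rw [hv]
  apply List.ext_getElem (by simp [hwexpr])
  intro li h1 h2
  have hli : li < ctN l0 lrest := by simpa [hwexpr] using h2
  simp only [List.getElem_map, List.getElem_mapIdx, List.getElem_range]
  congr 1
  have hwli : wexpr[li]'(by omega) = ctW l0 lrest li := by
    rw [← getElem!_pos wexpr li (by omega)]
    exact hwidth li hli
  apply List.ext_getElem (by simp [hwli])
  intro wi h3 h4
  have hwi : wi < ctW l0 lrest li := by simpa [hwli] using h4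
  simp only [List.getElem_map, List.getElem_mapIdx, List.getElem_range]
  have hfold : ((l0.map PySem.Str.split₀) :: lrest.map (fun l => l.map PySem.Str.split₀)).foldl
      (fun t g =>
        (fun g li wi (tally : PySem.Dict String Int) =>
          let word := (g[li]!)[wi]!
          tally.insert word (tally.getD word 0 + 1)) g li wi t) PySem.Dict.empty
      = PySem.Dict.counter (ctCol l0 lrest li wi) := by
    show ((l0.map PySem.Str.split₀) :: lrest.map (fun l => l.map PySem.Str.split₀)).foldl
      (fun (t : PySem.Dict String Int) g => t.insert ((g[li]!)[wi]!) (t.getD ((g[li]!)[wi]!) 0 + (1:Int))) PySem.Dict.empty = _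
    rw [← List.foldl_map (f := fun g => (g[li]!)[wi]!)
      (g := fun (t : PySem.Dict String Int) x => t.insert x (t.getD x 0 + (1:Int)))]
    have hcol : (((l0.map PySem.Str.split₀) :: lrest.map (fun l => l.map PySem.Str.split₀)).map
        (fun g => (g[li]!)[wi]!)) = ctCol l0 lrest li wi := by
      simp only [List.map_cons, List.map_map, ctCol, Function.comp_def]
      congr 1
      · have hl0 : li < l0.length := lt_of_lt_of_le hli (hb l0 (List.mem_cons_self))
        rw [getElem!_pos _ li (by simpa using hl0), List.getElem_map, getElem!_pos _ li hl0]
      · apply List.map_congr_left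
        intro l hl
        have hll : li < l.length := lt_of_lt_of_le hli (hb l (List.mem_cons_of_mem _ hl))
        rw [getElem!_pos _ li (by simpa using hll), List.getElem_map, getElem!_pos _ li hll]
    rw [hcol, PySem.Dict.foldl_insert_getD_add_one_eq_counter]
  rw [hfold, counter_select]



-- ===== main glue =====
theorem combine_texts_spec : Claim_equal_combine_texts := by
  intro texts _
  unfold Spec_combine_texts
  cases texts with
  | nil => rfl
  | cons t0 trest =>
    unfold combine_texts combine_texts_alt
    simp only [List.map_cons]
    simp only [PySem.List.foldl_append_singleton_eq_map, List.nil_append]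
    rw [A_core ((PySem.Str.split? t0 "\n").getD []) (trest.map (fun t => (PySem.Str.split? t "\n").getD []))]
    simp only [inner_select]
    have hmm : trest.map (fun t => ((PySem.Str.split? t "\n").getD []).map PySem.Str.split₀)
        = (trest.map (fun t => (PySem.Str.split? t "\n").getD [])).map (fun l => l.map PySem.Str.split₀) := by
      rw [List.map_map]; rfl
    rw [hmm]
    rw [B_core ((PySem.Str.split? t0 "\n").getD []) (trest.map (fun t => (PySem.Str.split? t "\n").getD []))]
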